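-- pv_equiv track=rewrite | github.com/fikayosalu/alx-interview | 0x01-lockboxes/0-lockboxes.py | canUnlockAll
-- ===== SOURCE A (Python) =====
-- def canUnlockAll(boxes):
--     """
--     Checks if all boxes can be opened starting from box 0.
--
--     Returns:
--         bool: True if all boxes can be opened, else False.
--     """
--     n = len(boxes)            # Total number of boxes
--     visited = set()           # Set to keep track of opened boxes
--     stack = [0]               # Start with box 0 (already unlocked)
--
--     while stack:
--         current = stack.pop()
--         if current not in visited:
--             visited.add(current)
--             for key in boxes[current]:
--                 if 0 <= key < n and key not in visited:
--                     stack.append(key)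
--
--     return len(visited) == n
-- ===== SOURCE B (Python) =====
-- def canUnlockAll(boxes):
--     """Fixed-point closure: repeatedly scan all unlocked boxes for new keys
--     until a pass adds nothing, then compare counts."""
--     n = len(boxes)
--     unlocked = {0}
--     while True:
--         new = {k for b in unlocked for k in boxes[b]
--                if 0 <= k < n and k not in unlocked}
--         if not new:
--             return len(unlocked) == n
--         unlocked |= new
-- ===== Notes on version B (the rewrite author's own statement) =====
-- stated objective: alternative
-- what changed: Replaces the explicit DFS frontier stack with a round-based fixed-point closure: each pass rescans every unlocked box, collects the not-yet-unlocked valid keys as a set, and stops when a pass adds nothing.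
-- outside the precondition, e.g. on canUnlockAll([]): A raises IndexError, B raises IndexError
import Mathlib
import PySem

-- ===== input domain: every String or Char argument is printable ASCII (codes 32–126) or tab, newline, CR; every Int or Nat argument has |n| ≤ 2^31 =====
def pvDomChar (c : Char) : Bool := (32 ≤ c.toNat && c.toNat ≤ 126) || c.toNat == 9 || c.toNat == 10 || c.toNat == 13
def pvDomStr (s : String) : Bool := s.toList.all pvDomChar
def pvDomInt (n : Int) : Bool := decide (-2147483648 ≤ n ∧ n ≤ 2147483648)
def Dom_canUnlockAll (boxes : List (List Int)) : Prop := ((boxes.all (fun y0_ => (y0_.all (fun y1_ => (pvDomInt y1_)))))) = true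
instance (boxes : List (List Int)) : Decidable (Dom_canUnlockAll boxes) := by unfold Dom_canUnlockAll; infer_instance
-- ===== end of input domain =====

-- B replaces A's DFS stack traversal with a round-based fixed-point closure (alternative
-- algorithm, similar cost); equivalence is about the return value (neither mutates its argument).

-- ===== PORT A =====
-- Literal port of A's while-stack DFS.  The fuel 1 + n + Σ|boxes[i]| only makes the loop
-- total; the measure lemmas below prove it never runs out (pops ≤ pushes ≤ 1 + Σ|boxes[i]|),
-- so the fuel branch is unreachable on every input.  boxes[current] is via pyGet?;
-- under Pre_ (boxes ≠ []) every index accessed is in range, so `.getD []` is exact.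
def canUnlockAllLoop (boxes : List (List Int)) (n : Int) :
    Nat → PySem.Set Int → List Int → Bool
  | 0, visited, _ => decide ((visited.length : Int) = n)
  | fuel+1, visited, stack =>
    match PySem.List.pop? stack (-1) with
    | none => decide ((visited.length : Int) = n)            -- while stack: exits
    | some (current, rest) =>
      if PySem.Set.contains visited current then
        canUnlockAllLoop boxes n fuel visited rest
      else
        let visited' := PySem.Set.add visited current
        let stack' := rest ++ ((PySem.List.pyGet? boxes current).getD []).filter
            (fun k => decide (0 ≤ k) && decide (k < n) && !(PySem.Set.contains visited' k))
        canUnlockAllLoop boxes n fuel visited' stack'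

def canUnlockAll (boxes : List (List Int)) : Bool :=
  canUnlockAllLoop boxes (boxes.length : Int)
    (1 + boxes.length + (boxes.map List.length).sum) PySem.Set.empty [0]

-- ===== PORT B =====
-- Literal port of B's while-True fixed point.  Each continuing pass strictly enlarges
-- `unlocked` inside [0, n), so fuel n + 1 is never exhausted (proved below).
def canUnlockAllAltLoop (boxes : List (List Int)) (n : Int) :
    Nat → PySem.Set Int → Bool
  | 0, unlocked => decide ((unlocked.length : Int) = n)
  | fuel+1, unlocked =>
    let nw : PySem.Set Int := PySem.Set.ofList
      (unlocked.flatMap (fun b => ((PySem.List.pyGet? boxes b).getD []).filter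
        (fun k => decide (0 ≤ k) && decide (k < n) && !(PySem.Set.contains unlocked k))))
    if nw.isEmpty then decide ((unlocked.length : Int) = n)
    else canUnlockAllAltLoop boxes n fuel (PySem.Set.union unlocked nw)

def canUnlockAll_alt (boxes : List (List Int)) : Bool :=
  canUnlockAllAltLoop boxes (boxes.length : Int) (boxes.length + 1)
    (PySem.Set.ofList [0])

-- ===== PRECONDITION & SPEC =====
-- On boxes = [] both Pythons raise IndexError (box 0 is accessed unconditionally).
def Pre_canUnlockAll (boxes : List (List Int)) : Prop := boxes ≠ []
instance (boxes : List (List Int)) : Decidable (Pre_canUnlockAll boxes) := by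
  unfold Pre_canUnlockAll; infer_instance

def pvWitness_canUnlockAll : List (List Int) := [[1], [0]]

def Spec_canUnlockAll (boxes : List (List Int)) (out : Bool) : Prop := out = canUnlockAll_alt boxes
instance (boxes : List (List Int)) (out : Bool) : Decidable (Spec_canUnlockAll boxes out) := by
  unfold Spec_canUnlockAll; infer_instance

-- ===== CLAIM (what is proved, stated in full; the proofs are below) =====
def Claim_equal_canUnlockAll : Prop := ∀ (boxes : List (List Int)), Dom_canUnlockAll boxes → Pre_canUnlockAll boxes → Spec_canUnlockAll boxes (canUnlockAll boxes)

-- ===== LEMMAS AND PROOFS =====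

-- The universe of box indices, the filtered key list of a box, one expansion step,
-- and its n-fold iterate (the reachability closure both programs compute).
def pvU (boxes : List (List Int)) : Finset Int :=
  (Finset.range boxes.length).image (fun i : Nat => (i : Int))

def pvKeys (boxes : List (List Int)) (v : Int) : List Int :=
  ((PySem.List.pyGet? boxes v).getD []).filter
    (fun k => decide (0 ≤ k) && decide (k < (boxes.length : Int)))

def pvSuccs (boxes : List (List Int)) (S : Finset Int) : Finset Int :=
  S.biUnion (fun v => (pvKeys boxes v).toFinset)

def pvStep (boxes : List (List Int)) (S : Finset Int) : Finset Int :=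
  S ∪ pvSuccs boxes S

def pvCl (boxes : List (List Int)) (S : Finset Int) : Finset Int :=
  (pvStep boxes)^[boxes.length] S

def pvClosed (boxes : List (List Int)) (T : Finset Int) : Prop :=
  pvSuccs boxes T ⊆ T

lemma pv_mem_U {boxes : List (List Int)} {k : Int} :
    k ∈ pvU boxes ↔ 0 ≤ k ∧ k < (boxes.length : Int) := by
  simp only [pvU, Finset.mem_image, Finset.mem_range]
  constructor
  · rintro ⟨i, hi, rfl⟩; omega
  · rintro ⟨h0, hlt⟩
    exact ⟨k.toNat, by omega, by omega⟩

lemma pv_keys_subset_U {boxes : List (List Int)} {v k : Int}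
    (h : k ∈ pvKeys boxes v) : k ∈ pvU boxes := by
  simp only [pvKeys, List.mem_filter, Bool.and_eq_true, decide_eq_true_eq] at h
  exact pv_mem_U.mpr ⟨h.2.1, h.2.2⟩

lemma pv_succs_mono {boxes : List (List Int)} {S T : Finset Int} (h : S ⊆ T) :
    pvSuccs boxes S ⊆ pvSuccs boxes T :=
  Finset.biUnion_subset_biUnion_of_subset_left _ h

lemma pv_succs_subset_U (boxes : List (List Int)) (S : Finset Int) :
    pvSuccs boxes S ⊆ pvU boxes := by
  intro k hk
  simp only [pvSuccs, Finset.mem_biUnion, List.mem_toFinset] at hk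
  obtain ⟨v, _, hkv⟩ := hk
  exact pv_keys_subset_U hkv

lemma pv_subset_step (boxes : List (List Int)) (S : Finset Int) : S ⊆ pvStep boxes S :=
  Finset.subset_union_left

lemma pv_step_mono {boxes : List (List Int)} {S T : Finset Int} (h : S ⊆ T) :
    pvStep boxes S ⊆ pvStep boxes T :=
  Finset.union_subset_union h (pv_succs_mono h)

lemma pv_step_subset_U {boxes : List (List Int)} {S : Finset Int} (h : S ⊆ pvU boxes) :
    pvStep boxes S ⊆ pvU boxes :=
  Finset.union_subset h (pv_succs_subset_U boxes S)

lemma pv_iterate_subset_U {boxes : List (List Int)} {S : Finset Int} (h : S ⊆ pvU boxes) :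
    ∀ k, (pvStep boxes)^[k] S ⊆ pvU boxes := by
  intro k
  induction k generalizing S with
  | zero => simpa using h
  | succ k ih => rw [Function.iterate_succ_apply]; exact ih (pv_step_subset_U h)

lemma pv_subset_iterate (boxes : List (List Int)) (k : Nat) (S : Finset Int) :
    S ⊆ (pvStep boxes)^[k] S := by
  induction k generalizing S with
  | zero => simp
  | succ k ih =>
    rw [Function.iterate_succ_apply]
    exact (pv_subset_step boxes S).trans (ih _)

lemma pv_subset_cl (boxes : List (List Int)) (S : Finset Int) : S ⊆ pvCl boxes S :=
  pv_subset_iterate boxes boxes.length S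

lemma pv_step_subset_cl {boxes : List (List Int)} (hn : 1 ≤ boxes.length) (S : Finset Int) :
    pvStep boxes S ⊆ pvCl boxes S := by
  unfold pvCl
  obtain ⟨m, hm⟩ : ∃ m, boxes.length = m + 1 := ⟨boxes.length - 1, by omega⟩
  rw [hm, Function.iterate_succ_apply]
  exact pv_subset_iterate boxes m _

lemma pv_cl_mono {boxes : List (List Int)} {S T : Finset Int} (h : S ⊆ T) :
    pvCl boxes S ⊆ pvCl boxes T := by
  unfold pvCl
  generalize boxes.length = k
  induction k generalizing S T with
  | zero => simpa using h
  | succ k ih =>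
    rw [Function.iterate_succ_apply, Function.iterate_succ_apply]
    exact ih (pv_step_mono h)

lemma pv_iterate_subset_of_closed {boxes : List (List Int)} {S T : Finset Int}
    (hST : S ⊆ T) (hT : pvClosed boxes T) : ∀ k, (pvStep boxes)^[k] S ⊆ T := by
  intro k
  induction k generalizing S with
  | zero => simpa using hST
  | succ k ih =>
    rw [Function.iterate_succ_apply]
    exact ih (Finset.union_subset hST ((pv_succs_mono hST).trans hT))

lemma pv_card_U (boxes : List (List Int)) : (pvU boxes).card = boxes.length := by
  unfold pvU
  rw [Finset.card_image_of_injective _ (fun a b h => by exact_mod_cast h), Finset.card_range]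

lemma pv_closed_U (boxes : List (List Int)) : pvClosed boxes (pvU boxes) :=
  pv_succs_subset_U boxes (pvU boxes)

lemma pv_stable_of_eq {boxes : List (List Int)} {S : Finset Int} {k : Nat}
    (h : (pvStep boxes)^[k + 1] S = (pvStep boxes)^[k] S) :
    ∀ m, k ≤ m → (pvStep boxes)^[m] S = (pvStep boxes)^[k] S := by
  intro m hm
  induction m with
  | zero =>
    have hk0 : k = 0 := by omega
    subst hk0; rfl
  | succ m ih =>
    rcases Nat.eq_or_lt_of_le hm with heq | hlt
    · rw [← heq]
    · have hkm : k ≤ m := by omega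
      rw [Function.iterate_succ_apply' (pvStep boxes) m S, ih hkm,
        ← Function.iterate_succ_apply' (pvStep boxes) k S, h]

lemma pv_closed_cl {boxes : List (List Int)} {S : Finset Int} (hS : S ⊆ pvU boxes) :
    pvClosed boxes (pvCl boxes S) := by
  by_cases hex : ∃ k < boxes.length, (pvStep boxes)^[k + 1] S = (pvStep boxes)^[k] S
  · obtain ⟨k, hk, heq⟩ := hex
    have h1 : pvCl boxes S = (pvStep boxes)^[k] S :=
      pv_stable_of_eq heq boxes.length (by omega)
    intro x hx
    have hx2 : x ∈ pvStep boxes (pvCl boxes S) := Finset.mem_union_right _ hx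
    rw [h1, ← Function.iterate_succ_apply' (pvStep boxes) k S, heq] at hx2
    rw [h1]
    exact hx2
  · simp only [not_exists, not_and] at hex
    have hgrow : ∀ k, k ≤ boxes.length → k ≤ ((pvStep boxes)^[k] S).card := by
      intro k hk
      induction k with
      | zero => omega
      | succ k ih =>
        have hne := hex k (by omega)
        have hsub : (pvStep boxes)^[k] S ⊆ (pvStep boxes)^[k + 1] S := by
          rw [Function.iterate_succ_apply']
          exact pv_subset_step _ _
        have : ((pvStep boxes)^[k] S).card < ((pvStep boxes)^[k + 1] S).card :=
          Finset.card_lt_card (Finset.ssubset_iff_subset_ne.mpr ⟨hsub, fun h => hne h.symm⟩)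
        have := ih (by omega)
        omega
    have hcard : boxes.length ≤ (pvCl boxes S).card := hgrow _ le_rfl
    have hsub : pvCl boxes S ⊆ pvU boxes := pv_iterate_subset_U hS _
    have : pvCl boxes S = pvU boxes :=
      Finset.eq_of_subset_of_card_le hsub (by rw [pv_card_U]; exact hcard)
    rw [this]; exact pv_closed_U boxes

lemma pv_cl_eq_of_closed {boxes : List (List Int)} {S : Finset Int}
    (h : pvClosed boxes S) : pvCl boxes S = S := by
  apply Finset.Subset.antisymm
  · exact pv_iterate_subset_of_closed (le_refl S) h _
  · exact pv_subset_cl boxes S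

lemma pv_cl_congr {boxes : List (List Int)} {S T : Finset Int}
    (hSU : S ⊆ pvU boxes) (hST : S ⊆ T) (hTc : T ⊆ pvCl boxes S) :
    pvCl boxes T = pvCl boxes S :=
  Finset.Subset.antisymm
    (pv_iterate_subset_of_closed hTc (pv_closed_cl hSU) _)
    (pv_cl_mono hST)

-- the DFS measure: stack length + Σ over unvisited universe of (1 + box size)
def pvLenOf (boxes : List (List Int)) (v : Int) : Nat :=
  ((PySem.List.pyGet? boxes v).getD []).length

def pvMeasure (boxes : List (List Int)) (V : Finset Int) (stack : List Int) : Nat :=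
  stack.length + ∑ v ∈ (pvU boxes \ V), (1 + pvLenOf boxes v)

lemma pv_list_sum_getElem (l : List Nat) : l.sum = ∑ i ∈ Finset.range l.length, l[i]! := by
  induction l with
  | nil => simp
  | cons x xs ih =>
    simp only [List.length_cons, Finset.sum_range_succ', List.sum_cons, ih]
    simp [Nat.add_comm]

lemma pv_sum_lenOf (boxes : List (List Int)) :
    ∑ v ∈ pvU boxes, (1 + pvLenOf boxes v) = boxes.length + (boxes.map List.length).sum := by
  unfold pvU
  rw [Finset.sum_image (by intro a _ b _ h; simpa using h)]
  rw [Finset.sum_add_distrib, Finset.sum_const, Finset.card_range, smul_eq_mul, mul_one]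
  congr 1
  have h := pv_list_sum_getElem (boxes.map List.length)
  rw [List.length_map] at h
  rw [h]
  apply Finset.sum_congr rfl
  intro i hi
  rw [Finset.mem_range] at hi
  unfold pvLenOf
  rw [PySem.List.pyGet?_natCast, List.getElem?_eq_getElem hi]
  simp [hi]

-- A's loop computes |cl(visited ∪ stack)| = n, given the DFS invariants.
lemma pv_dfs_correct (boxes : List (List Int)) :
    ∀ (fuel : Nat) (visited : PySem.Set Int) (stack : List Int),
    visited.Nodup →
    (∀ x ∈ visited, x ∈ pvU boxes) →
    (∀ x ∈ stack, x ∈ pvU boxes) →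
    (∀ v ∈ visited, ∀ k ∈ pvKeys boxes v, k ∈ visited ∨ k ∈ stack) →
    pvMeasure boxes visited.toFinset stack ≤ fuel →
    canUnlockAllLoop boxes (boxes.length : Int) fuel visited stack =
      decide (((pvCl boxes (visited.toFinset ∪ stack.toFinset)).card : Int) = (boxes.length : Int)) := by
  intro fuel
  induction fuel with
  | zero =>
    intro visited stack hnd hvU hsU hclosed hmeas
    have hstack : stack = [] := by
      unfold pvMeasure at hmeas
      have : stack.length = 0 := by omega
      exact List.length_eq_zero_iff.mp this
    subst hstack
    simp only [canUnlockAllLoop, List.toFinset_nil, Finset.union_empty]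
    have hclosedF : pvClosed boxes visited.toFinset := by
      intro k hk
      obtain ⟨v, hv, hkv⟩ := Finset.mem_biUnion.mp hk
      rcases hclosed v (List.mem_toFinset.mp hv) k (List.mem_toFinset.mp hkv) with h | h
      · exact List.mem_toFinset.mpr h
      · exact absurd h (List.not_mem_nil)
    rw [pv_cl_eq_of_closed hclosedF, List.toFinset_card_of_nodup hnd]
  | succ fuel ih =>
    intro visited stack hnd hvU hsU hclosed hmeas
    rcases List.eq_nil_or_concat stack with rfl | ⟨rest, current, rfl⟩
    · have hL : canUnlockAllLoop boxes (boxes.length : Int) (fuel+1) visited [] =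
          decide (((visited.length : Int)) = (boxes.length : Int)) := rfl
      rw [hL]
      simp only [List.toFinset_nil, Finset.union_empty]
      have hclosedF : pvClosed boxes visited.toFinset := by
        intro k hk
        obtain ⟨v, hv, hkv⟩ := Finset.mem_biUnion.mp hk
        rcases hclosed v (List.mem_toFinset.mp hv) k (List.mem_toFinset.mp hkv) with h | h
        · exact List.mem_toFinset.mpr h
        · exact absurd h (List.not_mem_nil)
      rw [pv_cl_eq_of_closed hclosedF, List.toFinset_card_of_nodup hnd]
    · simp only [List.concat_eq_append] at hsU hclosed hmeas ⊢
      have hcurU : current ∈ pvU boxes := hsU current (by simp)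
      have hn : 1 ≤ boxes.length := by
        have := pv_mem_U.mp hcurU
        by_contra h
        omega
      have hstackF : (rest ++ [current]).toFinset = rest.toFinset ∪ {current} := by
        simp
      simp only [canUnlockAllLoop, PySem.List.pop?_last rest current]
      by_cases hc : PySem.Set.contains visited current = true
      · rw [if_pos hc]
        have hcur : current ∈ visited := (PySem.Set.contains_iff visited current).mp hc
        have hFeq : visited.toFinset ∪ rest.toFinset =
            visited.toFinset ∪ (rest ++ [current]).toFinset := by
          rw [hstackF]
          ext x
          simp only [Finset.mem_union, Finset.mem_singleton, List.mem_toFinset]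
          constructor
          · tauto
          · rintro (h | h | rfl)
            · exact Or.inl h
            · exact Or.inr h
            · exact Or.inl hcur
        rw [ih visited rest hnd hvU (fun x hx => hsU x (by simp [hx]))
          (fun v hv k hk => by
            rcases hclosed v hv k hk with h | h
            · exact Or.inl h
            · rcases List.mem_append.mp h with h | h
              · exact Or.inr h
              · simp only [List.mem_singleton] at h
                subst h
                exact Or.inl hcur)
          (by
            unfold pvMeasure at hmeas ⊢
            simp only [List.length_append, List.length_cons, List.length_nil] at hmeas
            omega), hFeq]
      · rw [if_neg hc]
        have hcur : current ∉ visited := fun h => hc ((PySem.Set.contains_iff visited current).mpr h)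
        have hadd : PySem.Set.add visited current = visited ++ [current] :=
          PySem.Set.add_of_not_mem hcur
        set visited' := PySem.Set.add visited current with hv'
        set filt := ((PySem.List.pyGet? boxes current).getD []).filter
            (fun k => decide (0 ≤ k) && decide (k < (boxes.length : Int)) &&
              !(PySem.Set.contains visited' k)) with hfiltdef
        have hmemv' : ∀ x : Int, x ∈ visited' ↔ x ∈ visited ∨ x = current :=
          PySem.Set.mem_add visited current
        have hfilt : ∀ k : Int, k ∈ filt ↔ k ∈ pvKeys boxes current ∧ k ∉ visited' := by
          intro k
          simp only [hfiltdef, pvKeys, List.mem_filter, Bool.and_eq_true, decide_eq_true_eq,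
            Bool.not_eq_true', PySem.Set.contains_eq_listContains, List.contains_eq_mem,
            decide_eq_false_iff_not]
          tauto
        have hnd' : visited'.Nodup := PySem.Set.nodup_add visited current hnd
        have hvU' : ∀ x ∈ visited', x ∈ pvU boxes := by
          intro x hx
          rcases (hmemv' x).mp hx with h | rfl
          · exact hvU x h
          · exact hcurU
        have hsU' : ∀ x ∈ rest ++ filt, x ∈ pvU boxes := by
          intro x hx
          rcases List.mem_append.mp hx with h | h
          · exact hsU x (by simp [h])
          · exact pv_keys_subset_U ((hfilt x).mp h).1
        have hclosed' : ∀ v ∈ visited', ∀ k ∈ pvKeys boxes v,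
            k ∈ visited' ∨ k ∈ rest ++ filt := by
          intro v hv k hk
          rcases (hmemv' v).mp hv with h | rfl
          · rcases hclosed v h k hk with h2 | h2
            · exact Or.inl ((hmemv' k).mpr (Or.inl h2))
            · rcases List.mem_append.mp h2 with h3 | h3
              · exact Or.inr (List.mem_append.mpr (Or.inl h3))
              · simp only [List.mem_singleton] at h3
                exact Or.inl ((hmemv' k).mpr (Or.inr h3))
          · by_cases hkv : k ∈ visited'
            · exact Or.inl hkv
            · exact Or.inr (List.mem_append.mpr (Or.inr ((hfilt k).mpr ⟨hk, hkv⟩)))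
        have htFv' : visited'.toFinset = insert current visited.toFinset := by
          ext x
          simp only [List.mem_toFinset, Finset.mem_insert, hmemv' x]
          tauto
        have hmeas' : pvMeasure boxes visited'.toFinset (rest ++ filt) ≤ fuel := by
          unfold pvMeasure at hmeas ⊢
          have hsplit : (pvU boxes \ visited.toFinset) =
              insert current ((pvU boxes \ visited.toFinset).erase current) := by
            rw [Finset.insert_erase]
            exact Finset.mem_sdiff.mpr ⟨hcurU, fun h => hcur (List.mem_toFinset.mp h)⟩
          have hsum : ∑ v ∈ pvU boxes \ visited.toFinset, (1 + pvLenOf boxes v) =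
              (1 + pvLenOf boxes current) +
              ∑ v ∈ (pvU boxes \ visited.toFinset).erase current, (1 + pvLenOf boxes v) := by
            rw [hsplit]
            rw [Finset.sum_insert (Finset.notMem_erase current _)]
            rw [← hsplit]
          have herase : pvU boxes \ visited'.toFinset =
              (pvU boxes \ visited.toFinset).erase current := by
            rw [htFv']
            ext x
            simp only [Finset.mem_sdiff, Finset.mem_erase, Finset.mem_insert]
            tauto
          have hfl : filt.length ≤ pvLenOf boxes current := by
            rw [hfiltdef]
            exact List.length_filter_le _ _
          rw [herase]
          simp only [List.length_append, List.length_cons, List.length_nil] at hmeas ⊢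
          omega
        have hcl : pvCl boxes (visited'.toFinset ∪ (rest ++ filt).toFinset) =
            pvCl boxes (visited.toFinset ∪ (rest ++ [current]).toFinset) := by
          apply pv_cl_congr
          · intro x hx
            rcases Finset.mem_union.mp hx with h | h
            · exact hvU x (List.mem_toFinset.mp h)
            · exact hsU x (List.mem_toFinset.mp h)
          · intro x hx
            rw [List.toFinset_append]
            rcases Finset.mem_union.mp hx with h | h
            · exact Finset.mem_union_left _ (List.mem_toFinset.mpr
                ((hmemv' x).mpr (Or.inl (List.mem_toFinset.mp h))))
            · rw [hstackF] at h
              rcases Finset.mem_union.mp h with h | h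
              · exact Finset.mem_union_right _ (Finset.mem_union_left _ h)
              · rw [Finset.mem_singleton] at h
                subst h
                exact Finset.mem_union_left _ (List.mem_toFinset.mpr ((hmemv' x).mpr (Or.inr rfl)))
          · intro x hx
            rw [List.toFinset_append] at hx
            have hScur : current ∈ visited.toFinset ∪ (rest ++ [current]).toFinset := by
              rw [hstackF]
              exact Finset.mem_union_right _ (Finset.mem_union_right _ (Finset.mem_singleton_self _))
            rcases Finset.mem_union.mp hx with h | h
            · rcases (hmemv' x).mp (List.mem_toFinset.mp h) with h2 | rfl
              · exact pv_subset_cl boxes _ (Finset.mem_union_left _ (List.mem_toFinset.mpr h2))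
              · exact pv_subset_cl boxes _ hScur
            · rcases Finset.mem_union.mp h with h2 | h2
              · exact pv_subset_cl boxes _ (Finset.mem_union_right _ (by
                  rw [hstackF]
                  exact Finset.mem_union_left _ h2))
              · have hxk : x ∈ pvKeys boxes current := ((hfilt x).mp (List.mem_toFinset.mp h2)).1
                apply pv_step_subset_cl hn
                apply Finset.mem_union_right
                exact Finset.mem_biUnion.mpr ⟨current, hScur, List.mem_toFinset.mpr hxk⟩
        rw [ih visited' (rest ++ filt) hnd' hvU' hsU' hclosed' hmeas', hcl]

-- B's loop computes |cl(unlocked)| = n, given the invariants.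
lemma pv_fix_correct (boxes : List (List Int)) :
    ∀ (fuel : Nat) (unlocked : PySem.Set Int),
    unlocked.Nodup →
    (∀ x ∈ unlocked, x ∈ pvU boxes) →
    boxes.length + 1 ≤ unlocked.length + fuel →
    canUnlockAllAltLoop boxes (boxes.length : Int) fuel unlocked =
      decide (((pvCl boxes unlocked.toFinset).card : Int) = (boxes.length : Int)) := by
  intro fuel
  induction fuel with
  | zero =>
    intro unlocked hnd hsub hlen
    exfalso
    have hsubF : unlocked.toFinset ⊆ pvU boxes :=
      fun x hx => hsub x (List.mem_toFinset.mp hx)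
    have hle := Finset.card_le_card hsubF
    rw [pv_card_U, List.toFinset_card_of_nodup hnd] at hle
    omega
  | succ fuel ih =>
    intro unlocked hnd hsub hlen
    have hmem : ∀ k : Int,
        (k ∈ unlocked.flatMap (fun b => ((PySem.List.pyGet? boxes b).getD []).filter
          (fun k => decide (0 ≤ k) && decide (k < (boxes.length : Int)) &&
            !(PySem.Set.contains unlocked k)))) ↔
        (k ∈ pvSuccs boxes unlocked.toFinset ∧ k ∉ unlocked) := by
      intro k
      simp only [List.mem_flatMap, List.mem_filter, pvSuccs, pvKeys, Finset.mem_biUnion,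
        List.mem_toFinset, Bool.and_eq_true, decide_eq_true_eq, Bool.not_eq_true',
        PySem.Set.contains_eq_listContains, List.contains_eq_mem, decide_eq_false_iff_not]
      tauto
    simp only [canUnlockAllAltLoop]
    set L := unlocked.flatMap (fun b => ((PySem.List.pyGet? boxes b).getD []).filter
        (fun k => decide (0 ≤ k) && decide (k < (boxes.length : Int)) &&
          !(PySem.Set.contains unlocked k))) with hL
    by_cases hemp : (PySem.Set.ofList L).isEmpty
    · rw [if_pos hemp]
      have hclosed : pvClosed boxes unlocked.toFinset := by
        intro k hk
        by_contra hkn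
        have hkL : k ∈ L := (hmem k).mpr ⟨hk, fun h => hkn (List.mem_toFinset.mpr h)⟩
        have hk2 : k ∈ PySem.Set.ofList L := (PySem.Set.mem_ofList L k).mpr hkL
        rw [List.isEmpty_iff] at hemp
        rw [hemp] at hk2
        exact absurd hk2 (List.not_mem_nil)
      rw [pv_cl_eq_of_closed hclosed, List.toFinset_card_of_nodup hnd]
    · rw [if_neg hemp]
      have hsubF : unlocked.toFinset ⊆ pvU boxes :=
        fun x hx => hsub x (List.mem_toFinset.mp hx)
      have hne : PySem.Set.ofList L ≠ [] := fun h => hemp (by rw [h]; rfl)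
      obtain ⟨b, hb⟩ := List.exists_mem_of_ne_nil _ hne
      have hbprop := (hmem b).mp ((PySem.Set.mem_ofList L b).mp hb)
      have hbU : b ∈ pvU boxes := pv_succs_subset_U boxes _ hbprop.1
      have hn : 1 ≤ boxes.length := by
        have := pv_mem_U.mp hbU
        by_contra h
        omega
      have hnd' : (PySem.Set.union unlocked (PySem.Set.ofList L)).Nodup :=
        PySem.Set.nodup_union unlocked (PySem.Set.ofList L) hnd
      have hmemu' : ∀ x : Int, x ∈ PySem.Set.union unlocked (PySem.Set.ofList L) ↔
          x ∈ unlocked ∨ x ∈ L := by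
        intro x
        rw [PySem.Set.mem_union, PySem.Set.mem_ofList]
      have hsub' : ∀ x ∈ PySem.Set.union unlocked (PySem.Set.ofList L), x ∈ pvU boxes := by
        intro x hx
        rcases (hmemu' x).mp hx with h | h
        · exact hsub x h
        · exact pv_succs_subset_U boxes _ ((hmem x).mp h).1
      have htF : (PySem.Set.union unlocked (PySem.Set.ofList L)).toFinset =
          unlocked.toFinset ∪ (PySem.Set.ofList L).toFinset := by
        ext x
        simp only [List.mem_toFinset, Finset.mem_union, hmemu' x, PySem.Set.mem_ofList]
      have hcardge : unlocked.length + 1 ≤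
          (PySem.Set.union unlocked (PySem.Set.ofList L)).length := by
        have hins : insert b unlocked.toFinset ⊆
            (PySem.Set.union unlocked (PySem.Set.ofList L)).toFinset := by
          intro x hx
          rcases Finset.mem_insert.mp hx with rfl | hx
          · exact List.mem_toFinset.mpr ((hmemu' x).mpr (Or.inr ((PySem.Set.mem_ofList L x).mp hb)))
          · exact List.mem_toFinset.mpr ((hmemu' x).mpr (Or.inl (List.mem_toFinset.mp hx)))
        have h1 := Finset.card_le_card hins
        rw [Finset.card_insert_of_notMem (fun h => hbprop.2 (List.mem_toFinset.mp h)),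
          List.toFinset_card_of_nodup hnd, List.toFinset_card_of_nodup hnd'] at h1
        exact h1
      have hcl : pvCl boxes (PySem.Set.union unlocked (PySem.Set.ofList L)).toFinset =
          pvCl boxes unlocked.toFinset := by
        apply pv_cl_congr hsubF
        · intro x hx
          exact List.mem_toFinset.mpr ((hmemu' x).mpr (Or.inl (List.mem_toFinset.mp hx)))
        · intro x hx
          rw [htF] at hx
          rcases Finset.mem_union.mp hx with hx | hx
          · exact pv_subset_cl boxes _ hx
          · have hxs := ((hmem x).mp ((PySem.Set.mem_ofList L x).mp (List.mem_toFinset.mp hx))).1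
            exact pv_step_subset_cl hn _ (Finset.mem_union_right _ hxs)
      rw [ih _ hnd' hsub' (by omega), hcl]

-- ===== VERDICT (by name: the statement is the Claim_ definition above) =====
theorem canUnlockAll_spec : Claim_equal_canUnlockAll := by
  intro boxes _ hpre
  have hpre' : boxes ≠ [] := hpre
  have hn : 1 ≤ boxes.length := List.length_pos_iff.mpr hpre'
  have h0U : (0 : Int) ∈ pvU boxes := pv_mem_U.mpr ⟨le_refl 0, by exact_mod_cast hn⟩
  unfold Spec_canUnlockAll canUnlockAll canUnlockAll_alt
  rw [pv_dfs_correct boxes _ PySem.Set.empty [0] List.nodup_nil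
      (fun x hx => absurd hx (List.not_mem_nil))
      (fun x hx => by
        simp only [List.mem_singleton] at hx
        subst hx
        exact h0U)
      (fun v hv => absurd hv (List.not_mem_nil))
      (by
        unfold pvMeasure
        rw [show (PySem.Set.empty : PySem.Set Int).toFinset = (∅ : Finset Int) from rfl,
          Finset.sdiff_empty, pv_sum_lenOf]
        simp
        omega)]
  rw [show PySem.Set.ofList ([0] : List Int) = [0] from rfl]
  rw [pv_fix_correct boxes _ [0] (by simp)
      (fun x hx => by
        simp only [List.mem_singleton] at hx
        subst hx
        exact h0U)
      (by simp)]
  rw [show (PySem.Set.empty : PySem.Set Int).toFinset = (∅ : Finset Int) from rfl,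
    Finset.empty_union]
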